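-- pv_equiv track=rewrite | github.com/Steflavoie65/Lychrel_196_Formula | scripts/check_orbit_moduli.py | build_jacobian
-- ===== SOURCE A (Python) =====
-- def build_jacobian(a_digits_msb):
--     a = list(a_digits_msb)
--     d = len(a)
--     m = d // 2
--     var_count = d + 1
--     rows = []
--     for j in range(m):
--         k = d - 1 - j
--         coeff = [0] * var_count
--         if j - 1 >= 0:
--             coeff[j - 1] += 1
--         coeff[j] += -10
--         if k - 1 >= 0:
--             coeff[k - 1] += -1
--         coeff[k] += 10
--         rows.append(coeff)
--     return rows
-- ===== SOURCE B (Python) =====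
-- def build_jacobian(a_digits_msb):
--     d = len(list(a_digits_msb))
--     n = d + 1
--
--     def basis(t):
--         # the vector 10*e_t - e_{t-1} of length n, built by concatenation
--         head = [0] * (t - 1) + [-1, 10] if t >= 1 else [10]
--         return head + [0] * (n - len(head))
--
--     return [[x - y for x, y in zip(basis(d - 1 - j), basis(j))]
--             for j in range(d // 2)]
-- ===== Notes on version B (the rewrite author's own statement) =====
-- stated objective: alternative
-- what changed: B expresses each row algebraically as the difference basis(k) - basis(j) of two band vectors 10*e_t - e_{t-1} built by list concatenation and combined with a pointwise zip subtraction, instead of scattering four in-place += writes into a preallocated zero row.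
import Mathlib
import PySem

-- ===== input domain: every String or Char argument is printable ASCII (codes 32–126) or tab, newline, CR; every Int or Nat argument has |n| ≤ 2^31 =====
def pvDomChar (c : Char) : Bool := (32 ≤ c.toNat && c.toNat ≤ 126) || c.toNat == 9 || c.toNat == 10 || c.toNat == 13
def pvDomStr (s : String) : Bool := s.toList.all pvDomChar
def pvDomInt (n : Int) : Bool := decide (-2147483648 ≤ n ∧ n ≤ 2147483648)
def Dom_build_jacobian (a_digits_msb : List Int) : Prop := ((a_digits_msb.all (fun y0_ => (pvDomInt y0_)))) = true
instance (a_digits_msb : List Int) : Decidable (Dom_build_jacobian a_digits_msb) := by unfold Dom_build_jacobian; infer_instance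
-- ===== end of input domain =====

-- B builds each row algebraically as the pointwise difference basis(k) - basis(j) of two
-- band vectors 10*e_t - e_{t-1} made by concatenation, instead of A's four in-place +=
-- writes into a preallocated zero row (objective: alternative).

-- ===== PORT A =====
-- A: preallocate a zero row, scatter four in-place += updates, append rows in a loop.
def build_jacobian (a_digits_msb : List Int) : List (List Int) :=
  let a := a_digits_msb
  let d := a.length
  let m := d / 2
  let var_count := d + 1
  (List.range m).foldl (fun rows j =>
    let k := d - 1 - j
    let coeff := List.replicate var_count (0 : Int)
    let coeff := if (j : Int) - 1 ≥ 0 then coeff.modify (j - 1) (· + 1) else coeff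
    let coeff := coeff.modify j (· + (-10))
    let coeff := if (k : Int) - 1 ≥ 0 then coeff.modify (k - 1) (· + (-1)) else coeff
    let coeff := coeff.modify k (· + 10)
    rows ++ [coeff]) []

-- ===== PORT B =====
-- B helper: the vector 10*e_t - e_{t-1} of length n, built by concatenation.
def pvBasis (n t : Nat) : List Int :=
  let head := if 1 ≤ t then List.replicate (t - 1) (0 : Int) ++ [-1, 10] else [10]
  head ++ List.replicate (n - head.length) 0

-- B: each row is the pointwise difference basis(d-1-j) - basis(j).
def build_jacobian_alt (a_digits_msb : List Int) : List (List Int) :=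
  let d := a_digits_msb.length
  let n := d + 1
  (List.range (d / 2)).map (fun (j : Nat) =>
    List.zipWith (fun x y => x - y) (pvBasis n (d - 1 - j)) (pvBasis n j))

-- ===== PRECONDITION & SPEC =====
def Spec_build_jacobian (a_digits_msb : List Int) (out : List (List Int)) : Prop := out = build_jacobian_alt a_digits_msb
instance (a_digits_msb : List Int) (out : List (List Int)) : Decidable (Spec_build_jacobian a_digits_msb out) := by unfold Spec_build_jacobian; infer_instance

-- ===== CLAIM (what is proved, stated in full; the proofs are below) =====
def Claim_equal_build_jacobian : Prop := ∀ (a_digits_msb : List Int), Dom_build_jacobian a_digits_msb → Spec_build_jacobian a_digits_msb (build_jacobian a_digits_msb)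

-- ===== LEMMAS AND PROOFS =====

def F (t i : Nat) : Int := if i = t then 10 else if i + 1 = t then -1 else 0

lemma pvBasis_length (n t : Nat) (ht : t + 1 ≤ n) : (pvBasis n t).length = n := by
  simp only [pvBasis]
  split_ifs <;> simp <;> omega

lemma pvBasis_map (n t : Nat) (ht : t + 1 ≤ n) :
    pvBasis n t = (List.range n).map (F t) := by
  apply List.ext_getElem
  · rw [pvBasis_length n t ht]; simp
  · intro i h1 h2
    simp only [List.getElem_map, List.getElem_range]
    simp only [pvBasis]
    rcases Nat.eq_zero_or_pos t with h0 | hpos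
    · subst h0
      simp only [show ¬ (1 ≤ 0) by omega, if_false]
      rcases i with _ | i
      · simp [F]
      · rw [List.getElem_append_right (by simp)]
        simp [F]
    · simp only [if_pos (show 1 ≤ t from hpos)]
      have hlen : (List.replicate (t - 1) (0 : Int) ++ [-1, 10]).length = t + 1 := by
        simp; omega
      have hi0 : i < t - 1 + (n - (t - 1 + 2) + 1 + 1) := by
        simpa [pvBasis, if_pos (show 1 ≤ t from hpos)] using h1
      have hi : i < n := by omega
      by_cases hlt : i < t - 1
      · rw [List.getElem_append_left (by omega), List.getElem_append_left (by simpa using hlt)]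
        simp [F]; omega
      · by_cases hmid : i < t + 1
        · rw [List.getElem_append_left (by omega), List.getElem_append_right (by simp; omega)]
          simp only [List.length_replicate]
          rcases (show i - (t - 1) = 0 ∨ i - (t - 1) = 1 by omega) with h | h <;>
            simp [h, F] <;> omega
        · rw [List.getElem_append_right (by omega)]
          simp [F]; omega

lemma zipWith_self_eq_map {α β : Type} (f : α → α → β) (l : List α) :
    List.zipWith f l l = l.map (fun a => f a a) := by
  induction l with
  | nil => simp
  | cons x xs ih => simp


lemma row_eq (d j : Nat) (hj : j < d / 2) :
    ((if ((d - 1 - j : Nat) : Int) - 1 ≥ 0 then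
        ((if (j : Int) - 1 ≥ 0 then
            (List.replicate (d + 1) (0 : Int)).modify (j - 1) (· + 1)
          else List.replicate (d + 1) (0 : Int)).modify j (· + (-10))).modify (d - 1 - j - 1) (· + (-1))
      else
        (if (j : Int) - 1 ≥ 0 then
            (List.replicate (d + 1) (0 : Int)).modify (j - 1) (· + 1)
          else List.replicate (d + 1) (0 : Int)).modify j (· + (-10))).modify (d - 1 - j) (· + 10))
    = List.zipWith (fun x y => x - y) (pvBasis (d + 1) (d - 1 - j)) (pvBasis (d + 1) j) := by
  have hd : 2 ≤ d := by omega
  have hkb : (d - 1 - j) + 1 ≤ d + 1 := by omega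
  have hjb : j + 1 ≤ d + 1 := by omega
  have hkj : j < d - 1 - j := by omega
  have hc : ((d - 1 - j : Nat) : Int) - 1 ≥ 0 := by omega
  rw [if_pos hc, pvBasis_map _ _ hkb, pvBasis_map _ _ hjb, List.zipWith_map, zipWith_self_eq_map]
  apply List.ext_getElem
  · split_ifs <;> simp [List.length_modify]
  · intro i h1 h2
    by_cases hj1 : (j : Int) - 1 ≥ 0 <;>
      [simp only [if_pos hj1, List.getElem_modify, List.getElem_map,
         List.getElem_range, List.getElem_replicate, F];
       simp only [if_neg hj1, List.getElem_modify, List.getElem_map,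
         List.getElem_range, List.getElem_replicate, F]] <;>
      split_ifs <;> omega

theorem pvRows_fold (d : Nat) :
    (List.range (d / 2)).foldl (fun rows j => rows ++
      [((if ((d - 1 - j : Nat) : Int) - 1 ≥ 0 then
          ((if (j : Int) - 1 ≥ 0 then
              (List.replicate (d + 1) (0 : Int)).modify (j - 1) (· + 1)
            else List.replicate (d + 1) (0 : Int)).modify j (· + (-10))).modify (d - 1 - j - 1) (· + (-1))
        else
          (if (j : Int) - 1 ≥ 0 then
              (List.replicate (d + 1) (0 : Int)).modify (j - 1) (· + 1)
            else List.replicate (d + 1) (0 : Int)).modify j (· + (-10))).modify (d - 1 - j) (· + 10))]) []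
    = (List.range (d / 2)).map (fun (j : Nat) =>
        List.zipWith (fun x y => x - y) (pvBasis (d + 1) (d - 1 - j)) (pvBasis (d + 1) j)) := by
  rw [PySem.List.foldl_append_singleton_eq_map]
  simp only [List.nil_append]
  apply List.map_congr_left
  intro j hj
  rw [List.mem_range] at hj
  exact row_eq d j hj

-- ===== VERDICT (by name: the statement is the Claim_ definition above) =====
theorem build_jacobian_spec : Claim_equal_build_jacobian := by
  intro a _
  show build_jacobian a = build_jacobian_alt a
  unfold build_jacobian build_jacobian_alt
  exact pvRows_fold a.length
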